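-- pv_equiv track=rewrite | github.com/senahazir/moontrace-tapp | internal/backend/vcd/vcd_parser.py | build_descendants_map
-- ===== SOURCE A (Python) =====
-- def build_descendants_map(edges):
--
--     from collections import deque, defaultdict
--
--     descendants_of = defaultdict(set)
--
--     for driver in edges.keys():
--         visited = set()
--         queue = deque([driver])
--         while queue:
--             current = queue.popleft()
--             if current in edges:
--                 for nxt in edges[current]:
--                     if nxt not in visited:
--                         visited.add(nxt)
--                         queue.append(nxt)
--         descendants_of[driver] = visited
--
--     return descendants_of
-- ===== SOURCE B (Python) =====
-- def build_descendants_map(edges):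
--     # Iterative fixpoint (Gauss-Seidel) propagation of descendant sets,
--     # instead of one BFS per source.
--     from collections import defaultdict
--
--     desc = {v: set(edges[v]) for v in edges}
--
--     changed = True
--     while changed:
--         changed = False
--         for v in edges:
--             acc = desc[v]
--             for c in edges[v]:
--                 if c in desc and not desc[c] <= acc:
--                     acc = acc | desc[c]
--                     changed = True
--             desc[v] = acc
--
--     out = defaultdict(set)
--     for v in edges:
--         out[v] = desc[v]
--     return out
-- ===== Notes on version B (the rewrite author's own statement) =====
-- stated objective: alternative
-- what changed: Replaces one breadth-first search (deque + visited set) per source node by a single Gauss-Seidel fixpoint iteration that repeatedly sweeps over all keys, merging each child's whole descendant set into its parent's until a full sweep changes nothing.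
import Mathlib
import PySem

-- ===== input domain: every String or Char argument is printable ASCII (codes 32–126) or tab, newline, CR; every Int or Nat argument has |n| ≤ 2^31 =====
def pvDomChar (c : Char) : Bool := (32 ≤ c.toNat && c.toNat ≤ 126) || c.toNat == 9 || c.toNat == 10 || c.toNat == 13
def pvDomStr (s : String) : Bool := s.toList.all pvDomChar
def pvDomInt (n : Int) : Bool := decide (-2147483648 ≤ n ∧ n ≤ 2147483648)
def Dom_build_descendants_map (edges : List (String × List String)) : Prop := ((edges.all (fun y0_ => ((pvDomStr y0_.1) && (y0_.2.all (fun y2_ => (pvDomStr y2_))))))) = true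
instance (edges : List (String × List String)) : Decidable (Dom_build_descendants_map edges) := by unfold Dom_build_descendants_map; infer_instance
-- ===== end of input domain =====

-- B replaces A's per-source BFS by a Gauss–Seidel fixpoint propagation of whole descendant
-- sets (objective: alternative algorithm, similar cost).  Python 'set' values carry no
-- observable order, so both ports emit every result set in sorted order (set outputs are
-- compared as finite sets).

-- ===== PORT A =====

-- all strings that can ever enter a 'visited' set: the dict's value strings
def pvUniv (d : PySem.Dict String (List String)) : List String :=
  PySem.Set.ofList d.values.flatten

-- inner loop of A: for nxt in edges[current]: if nxt not in visited: visited.add(nxt); queue.append(nxt)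
-- returns (new visited, list of newly appended queue entries)
def pvRelax : PySem.Set String → List String → PySem.Set String × List String
  | vis, [] => (vis, [])
  | vis, n :: rest =>
    if vis.contains n then pvRelax vis rest
    else
      let p := pvRelax (vis.add n) rest
      (p.1, n :: p.2)

-- the next lemmas are cited by pvBFS's decreasing_by
lemma pvSetContains (vis : PySem.Set String) (n : String) : vis.contains n = true ↔ n ∈ vis := by
  simp [PySem.Set.contains, List.contains_iff_mem]

lemma pvRelax_cons_pos (vis : PySem.Set String) (n : String) (rest : List String) (h : n ∈ vis) :
    pvRelax vis (n :: rest) = pvRelax vis rest := by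
  simp only [pvRelax]
  rw [if_pos ((pvSetContains vis n).mpr h)]

lemma pvRelax_cons_neg (vis : PySem.Set String) (n : String) (rest : List String) (h : n ∉ vis) :
    pvRelax vis (n :: rest)
      = ((pvRelax (vis.add n) rest).1, n :: (pvRelax (vis.add n) rest).2) := by
  simp only [pvRelax]
  rw [if_neg (fun hc => h ((pvSetContains vis n).mp hc))]

lemma pvRelax_pos_fst (vis : PySem.Set String) (n : String) (rest : List String) (h : n ∈ vis) :
    (pvRelax vis (n :: rest)).1 = (pvRelax vis rest).1 := by rw [pvRelax_cons_pos vis n rest h]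

lemma pvRelax_pos_snd (vis : PySem.Set String) (n : String) (rest : List String) (h : n ∈ vis) :
    (pvRelax vis (n :: rest)).2 = (pvRelax vis rest).2 := by rw [pvRelax_cons_pos vis n rest h]

lemma pvRelax_neg_fst (vis : PySem.Set String) (n : String) (rest : List String) (h : n ∉ vis) :
    (pvRelax vis (n :: rest)).1 = (pvRelax (vis.add n) rest).1 := by
  rw [pvRelax_cons_neg vis n rest h]

lemma pvRelax_neg_snd (vis : PySem.Set String) (n : String) (rest : List String) (h : n ∉ vis) :
    (pvRelax vis (n :: rest)).2 = n :: (pvRelax (vis.add n) rest).2 := by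
  rw [pvRelax_cons_neg vis n rest h]

lemma pvRelax_fst (lst : List String) : ∀ vis, (pvRelax vis lst).1 = vis ++ (pvRelax vis lst).2 := by
  induction lst with
  | nil => intro vis; simp [pvRelax]
  | cons n rest ih =>
    intro vis
    by_cases h : n ∈ vis
    · rw [pvRelax_pos_fst vis n rest h, pvRelax_pos_snd vis n rest h]; exact ih vis
    · have hadd : vis.add n = vis ++ [n] := by simp [PySem.Set.add, h]
      rw [pvRelax_neg_fst vis n rest h, pvRelax_neg_snd vis n rest h, ih (vis.add n), hadd]
      simp

lemma pvRelax_snd_mem (lst : List String) : ∀ vis x, x ∈ (pvRelax vis lst).2 → x ∈ lst := by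
  induction lst with
  | nil => intro vis x hx; simp [pvRelax] at hx
  | cons n rest ih =>
    intro vis x hx
    by_cases h : n ∈ vis
    · rw [pvRelax_pos_snd vis n rest h] at hx
      exact List.mem_cons_of_mem _ (ih vis x hx)
    · rw [pvRelax_neg_snd vis n rest h] at hx
      rcases List.mem_cons.mp hx with hx | hx
      · simp [hx]
      · exact List.mem_cons_of_mem _ (ih (vis.add n) x hx)

lemma pvRelax_snd_notvis (lst : List String) : ∀ vis x, x ∈ (pvRelax vis lst).2 → x ∉ vis := by
  induction lst with
  | nil => intro vis x hx; simp [pvRelax] at hx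
  | cons n rest ih =>
    intro vis x hx
    by_cases h : n ∈ vis
    · rw [pvRelax_pos_snd vis n rest h] at hx; exact ih vis x hx
    · rw [pvRelax_neg_snd vis n rest h] at hx
      rcases List.mem_cons.mp hx with hx | hx
      · subst hx; exact h
      · exact fun hmem => ih (vis.add n) x hx ((PySem.Set.mem_add vis n x).mpr (Or.inl hmem))

lemma pvRelax_snd_nodup (lst : List String) : ∀ vis, (pvRelax vis lst).2.Nodup := by
  induction lst with
  | nil => intro vis; simp [pvRelax]
  | cons n rest ih =>
    intro vis
    by_cases h : n ∈ vis
    · rw [pvRelax_pos_snd vis n rest h]; exact ih vis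
    · rw [pvRelax_neg_snd vis n rest h, List.nodup_cons]
      constructor
      · intro hmem
        exact pvRelax_snd_notvis rest (vis.add n) n hmem ((PySem.Set.mem_add vis n n).mpr (Or.inr rfl))
      · exact ih (vis.add n)

lemma pvFilterDrop (U vis new : List String) (hU : U.Nodup) (hn : new.Nodup)
    (hd : ∀ x ∈ new, x ∉ vis) (hsub : ∀ x ∈ new, x ∈ U) :
    (U.filter (fun x => decide (x ∉ vis ++ new))).length + new.length
      ≤ (U.filter (fun x => decide (x ∉ vis))).length := by
  have h1 := List.length_eq_length_filter_add (l := U.filter (fun x => decide (x ∉ vis))) (fun x => decide (x ∈ new))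
  have h2 : (U.filter (fun x => decide (x ∉ vis))).filter (fun x => !decide (x ∈ new))
      = U.filter (fun x => decide (x ∉ vis ++ new)) := by
    rw [List.filter_filter]
    apply List.filter_congr
    intro x _
    by_cases h1x : x ∈ vis <;> by_cases h2x : x ∈ new <;> simp [h1x, h2x, List.mem_append]
  have h3 : new.length ≤ ((U.filter (fun x => decide (x ∉ vis))).filter (fun x => decide (x ∈ new))).length := by
    apply List.Subperm.length_le
    apply List.Nodup.subperm hn
    intro x hx
    simp only [List.mem_filter, decide_eq_true_eq]
    exact ⟨⟨hsub x hx, hd x hx⟩, hx⟩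
  rw [← h2]
  omega

lemma pvGetD_univ (d : PySem.Dict String (List String)) (c : String)
    (hc : d.contains c = true) : ∀ x ∈ d.getD c [], x ∈ pvUniv d := by
  intro x hx
  have h1 : d.get? c ≠ none := by
    rw [Ne, PySem.Dict.get?_eq_none_iff_contains, hc]; simp
  obtain ⟨val, hval⟩ := Option.ne_none_iff_exists'.mp h1
  have hgd : d.getD c [] = val := by rw [PySem.Dict.getD_eq_get?_getD, hval]; rfl
  have hitem := PySem.Dict.mem_items_of_get?_eq_some d hval
  have hv : val ∈ d.values := by
    simp only [PySem.Dict.values, List.mem_map]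
    exact ⟨(c, val), hitem, rfl⟩
  rw [pvUniv, PySem.Set.mem_ofList, List.mem_flatten]
  exact ⟨val, hv, by rw [hgd] at hx; exact hx⟩

-- A's BFS: while queue: current = queue.popleft(); if current in edges: <pvRelax>
def pvBFS (d : PySem.Dict String (List String)) (q : List String) (vis : PySem.Set String) :
    PySem.Set String :=
  match q with
  | [] => vis
  | c :: rest =>
    if hc : d.contains c = true then
      pvBFS d (rest ++ (pvRelax vis (d.getD c [])).2) (pvRelax vis (d.getD c [])).1
    else
      pvBFS d rest vis
termination_by 2 * ((pvUniv d).filter (fun x => decide (x ∉ vis))).length + q.length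
decreasing_by
  · have hdrop := pvFilterDrop (pvUniv d) vis (pvRelax vis (d.getD c [])).2
      (by rw [pvUniv]; exact PySem.Set.nodup_ofList _)
      (pvRelax_snd_nodup _ _)
      (pvRelax_snd_notvis _ _)
      (fun x hx => pvGetD_univ d c hc x (pvRelax_snd_mem _ _ x hx))
    rw [pvRelax_fst]
    simp only [List.length_append, List.length_cons]
    omega
  · simp only [List.length_cons]; omega

def build_descendants_map (edges : List (String × List String)) : List (String × List String) :=
  let d := PySem.Dict.ofList edges
  (d.keys.foldl
    (fun out driver =>
      out.insert driver (PySem.List.sorted (pvBFS d [driver] PySem.Set.empty) (fun x => x)))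
    PySem.Dict.empty).items

-- ===== PORT B =====

-- inner loop of B: for c in edges[v]: if c in desc and not desc[c] <= acc: acc |= desc[c]; changed = True
def pvInner (m : PySem.Dict String (List String)) :
    List String → PySem.Set String → Bool → PySem.Set String × Bool
  | [], acc, ch => (acc, ch)
  | c :: rest, acc, ch =>
    if m.contains c && !(PySem.Set.issubset (m.getD c []) acc) then
      pvInner m rest (PySem.Set.union acc (m.getD c [])) true
    else
      pvInner m rest acc ch

-- one sweep: for v in edges: <pvInner>; desc[v] = acc
def pvSweep (d : PySem.Dict String (List String)) :
    List String → PySem.Dict String (List String) → Bool →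
    PySem.Dict String (List String) × Bool
  | [], m, ch => (m, ch)
  | v :: rest, m, ch =>
    pvSweep d rest
      (m.insert v (pvInner m (d.getD v []) (m.getD v []) ch).1)
      (pvInner m (d.getD v []) (m.getD v []) ch).2

-- while changed: (fuel only makes the loop total; lemma pvFix_spec below proves the
-- fixpoint is always reached before the fuel passed by build_descendants_map_alt runs out)
def pvFix (d : PySem.Dict String (List String)) (ks : List String) :
    Nat → PySem.Dict String (List String) → PySem.Dict String (List String)
  | 0, m => m
  | Nat.succ fuel, m =>
    if (pvSweep d ks m false).2 then pvFix d ks fuel (pvSweep d ks m false).1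
    else (pvSweep d ks m false).1

def build_descendants_map_alt (edges : List (String × List String)) : List (String × List String) :=
  let d := PySem.Dict.ofList edges
  let m0 := d.keys.foldl (fun m v => m.insert v (PySem.Set.ofList (d.getD v []))) PySem.Dict.empty
  let M := pvFix d d.keys (d.keys.length * (pvUniv d).length + 1) m0
  (d.keys.foldl
    (fun out v => out.insert v (PySem.List.sorted (M.getD v []) (fun x => x)))
    PySem.Dict.empty).items

-- ===== PRECONDITION & SPEC =====
def Spec_build_descendants_map (edges : List (String × List String)) (out : List (String × List String)) : Prop := out = build_descendants_map_alt edges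
instance (edges : List (String × List String)) (out : List (String × List String)) : Decidable (Spec_build_descendants_map edges out) := by unfold Spec_build_descendants_map; infer_instance

-- ===== CLAIM (what is proved, stated in full; the proofs are below) =====
def Claim_equal_build_descendants_map : Prop := ∀ (edges : List (String × List String)), Dom_build_descendants_map edges → Spec_build_descendants_map edges (build_descendants_map edges)

-- ===== LEMMAS AND PROOFS =====

-- reachability in ≥ 1 steps, every expanded node being a key of the dict
inductive pvReach (d : PySem.Dict String (List String)) : String → String → Prop
  | base {v x : String} : d.contains v = true → x ∈ d.getD v [] → pvReach d v x
  | cons {v c x : String} : d.contains v = true → c ∈ d.getD v [] → pvReach d c x → pvReach d v x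

lemma pvReach_key {d : PySem.Dict String (List String)} {v x : String}
    (h : pvReach d v x) : d.contains v = true := by
  cases h with
  | base hv _ => exact hv
  | cons hv _ _ => exact hv

lemma pvReach_univ {d : PySem.Dict String (List String)} {v x : String}
    (h : pvReach d v x) : x ∈ pvUniv d := by
  induction h with
  | base hv hx => exact pvGetD_univ _ _ hv _ hx
  | cons _ _ _ ih => exact ih

lemma pvReach_snoc {d : PySem.Dict String (List String)} {v c x : String}
    (h : pvReach d v c) : d.contains c = true → x ∈ d.getD c [] → pvReach d v x := by
  induction h with
  | base hv hm => intro hc hx; exact pvReach.cons hv hm (pvReach.base hc hx)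
  | cons hv hm _ ih => intro hc hx; exact pvReach.cons hv hm (ih hc hx)

lemma pvReach_sub (d : PySem.Dict String (List String)) (S : List String)
    (hS : ∀ u ∈ S, d.contains u = true → ∀ y ∈ d.getD u [], y ∈ S) :
    ∀ v x, pvReach d v x → (d.contains v = true → ∀ y ∈ d.getD v [], y ∈ S) → x ∈ S := by
  intro v x h
  induction h with
  | base hv hx => intro hroot; exact hroot hv _ hx
  | cons hv hm _ ih =>
    intro hroot
    exact ih (hS _ (hroot hv _ hm))

lemma pvRelax_fst_mem (lst : List String) : ∀ vis x,
    x ∈ (pvRelax vis lst).1 ↔ x ∈ vis ∨ x ∈ lst := by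
  induction lst with
  | nil => intro vis x; simp [pvRelax]
  | cons n rest ih =>
    intro vis x
    by_cases h : n ∈ vis
    · rw [pvRelax_pos_fst vis n rest h, ih]
      constructor
      · rintro (hx | hx)
        · exact Or.inl hx
        · exact Or.inr (List.mem_cons_of_mem _ hx)
      · rintro (hx | hx)
        · exact Or.inl hx
        · rcases List.mem_cons.mp hx with hx | hx
          · exact Or.inl (hx ▸ h)
          · exact Or.inr hx
    · rw [pvRelax_neg_fst vis n rest h, ih, PySem.Set.mem_add]
      simp only [List.mem_cons]
      tauto

lemma pvBFS_nodup (d : PySem.Dict String (List String)) :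
    ∀ q vis, List.Nodup vis → List.Nodup (pvBFS d q vis) := by
  intro q vis
  fun_induction pvBFS d q vis with
  | case1 => intro h; exact h
  | case2 vis c rest hc ih =>
    intro h
    apply ih
    rw [pvRelax_fst]
    rw [List.nodup_append]
    refine ⟨h, pvRelax_snd_nodup _ _, ?_⟩
    intro a ha b hb hab
    exact pvRelax_snd_notvis _ _ b hb (hab ▸ ha)
  | case3 vis c rest hc ih => exact ih

lemma pvBFS_spec (d : PySem.Dict String (List String)) (v : String) :
    ∀ q vis,
    (∀ u ∈ q, u = v ∨ u ∈ vis) →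
    (∀ x ∈ vis, pvReach d v x) →
    (∀ u, (u = v ∨ u ∈ vis) → u ∈ q ∨ (d.contains u = true → ∀ y ∈ d.getD u [], y ∈ vis)) →
    (∀ x ∈ pvBFS d q vis, pvReach d v x) ∧
    (∀ x ∈ vis, x ∈ pvBFS d q vis) ∧
    (∀ u, (u = v ∨ u ∈ pvBFS d q vis) → d.contains u = true →
      ∀ y ∈ d.getD u [], y ∈ pvBFS d q vis) := by
  intro q vis
  fun_induction pvBFS d q vis with
  | case1 vis =>
    intro _H1 H2 H3
    refine ⟨H2, fun x hx => hx, ?_⟩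
    intro u hu hcu y hy
    rcases H3 u hu with h | h
    · simp at h
    · exact h hcu y hy
  | case2 vis c rest hc ih =>
    intro H1 H2 H3
    have hmem : ∀ x, x ∈ (pvRelax vis (d.getD c [])).1 ↔ x ∈ vis ∨ x ∈ d.getD c [] :=
      fun x => pvRelax_fst_mem _ _ x
    have hcv : c = v ∨ c ∈ vis := H1 c (List.mem_cons_self ..)
    -- every element of the new visited set is reachable from v
    have H2' : ∀ x ∈ (pvRelax vis (d.getD c [])).1, pvReach d v x := by
      intro x hx
      rcases (hmem x).mp hx with hx | hx
      · exact H2 x hx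
      · rcases hcv with h | h
        · exact h ▸ pvReach.base hc hx
        · exact pvReach_snoc (H2 c h) hc hx
    have H1' : ∀ u ∈ rest ++ (pvRelax vis (d.getD c [])).2,
        u = v ∨ u ∈ (pvRelax vis (d.getD c [])).1 := by
      intro u hu
      rcases List.mem_append.mp hu with hu | hu
      · rcases H1 u (List.mem_cons_of_mem _ hu) with h | h
        · exact Or.inl h
        · exact Or.inr ((hmem u).mpr (Or.inl h))
      · refine Or.inr ?_
        rw [pvRelax_fst]
        exact List.mem_append.mpr (Or.inr hu)
    have H3' : ∀ u, (u = v ∨ u ∈ (pvRelax vis (d.getD c [])).1) →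
        u ∈ rest ++ (pvRelax vis (d.getD c [])).2 ∨
        (d.contains u = true → ∀ y ∈ d.getD u [], y ∈ (pvRelax vis (d.getD c [])).1) := by
      intro u hu
      by_cases huc : u = c
      · subst huc
        exact Or.inr (fun _ y hy => (hmem y).mpr (Or.inr hy))
      · have : (u = v ∨ u ∈ vis) ∨ u ∈ (pvRelax vis (d.getD c [])).2 := by
          rcases hu with h | h
          · exact Or.inl (Or.inl h)
          · rw [pvRelax_fst] at h
            rcases List.mem_append.mp h with h | h
            · exact Or.inl (Or.inr h)
            · exact Or.inr h
        rcases this with h | h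
        · rcases H3 u h with h2 | h2
          · rcases List.mem_cons.mp h2 with h3 | h3
            · exact absurd h3 huc
            · exact Or.inl (List.mem_append.mpr (Or.inl h3))
          · exact Or.inr (fun hcu y hy => (hmem y).mpr (Or.inl (h2 hcu y hy)))
        · exact Or.inl (List.mem_append.mpr (Or.inr h))
    obtain ⟨C1, C2, C3⟩ := ih H1' H2' H3'
    refine ⟨C1, ?_, C3⟩
    intro x hx
    exact C2 x ((hmem x).mpr (Or.inl hx))
  | case3 vis c rest hc ih =>
    intro H1 H2 H3
    have H1' : ∀ u ∈ rest, u = v ∨ u ∈ vis := fun u hu => H1 u (List.mem_cons_of_mem _ hu)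
    have H3' : ∀ u, (u = v ∨ u ∈ vis) → u ∈ rest ∨
        (d.contains u = true → ∀ y ∈ d.getD u [], y ∈ vis) := by
      intro u hu
      rcases H3 u hu with h | h
      · rcases List.mem_cons.mp h with h2 | h2
        · subst h2; exact Or.inr (fun hcu => absurd hcu hc)
        · exact Or.inl h2
      · exact Or.inr h
    exact ih H1' H2 H3'

lemma pvBFS_reach (d : PySem.Dict String (List String)) (v : String) :
    ∀ x, x ∈ pvBFS d [v] PySem.Set.empty ↔ pvReach d v x := by
  have main := pvBFS_spec d v [v] PySem.Set.empty
    (by intro u hu; simp at hu; exact Or.inl hu)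
    (by intro x hx; simp [PySem.Set.empty] at hx)
    (by intro u hu; rcases hu with h | h
        · exact Or.inl (by simp [h])
        · simp [PySem.Set.empty] at h)
  obtain ⟨C1, _C2, C3⟩ := main
  intro x
  constructor
  · exact C1 x
  · intro hr
    exact pvReach_sub d _ (fun u hu => C3 u (Or.inr hu)) v x hr (C3 v (Or.inl rfl))

-- ---------- B-side lemmas ----------

lemma pvSet_issubset_iff (s t : PySem.Set String) :
    PySem.Set.issubset s t = true ↔ ∀ x ∈ s, x ∈ t := by
  simp [PySem.Set.issubset, List.all_eq_true, PySem.Set.contains, List.contains_iff_mem]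

lemma pvSet_update_len (xs : List String) : ∀ s : PySem.Set String,
    s.length ≤ (PySem.Set.update s xs).length := by
  induction xs with
  | nil => intro s; simp [PySem.Set.update]
  | cons y ys ih =>
    intro s
    have h1 : s.length ≤ (s.add y).length := by
      by_cases h : y ∈ s <;> simp [PySem.Set.add, h]
    calc s.length ≤ (s.add y).length := h1
    _ ≤ (PySem.Set.update (s.add y) ys).length := ih _
    _ = (PySem.Set.update s (y :: ys)).length := by simp [PySem.Set.update]

lemma pvSet_union_len (s t : PySem.Set String) :
    s.length ≤ (PySem.Set.union s t).length := by
  rw [PySem.Set.union]; exact pvSet_update_len t s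

lemma pvSet_union_lt (t : List String) : ∀ s : PySem.Set String,
    (∃ x ∈ t, x ∉ s) → s.length < (PySem.Set.union s t).length := by
  induction t with
  | nil => intro s h; simp at h
  | cons y ys ih =>
    intro s ⟨x, hx, hxs⟩
    have hupd : PySem.Set.union s (y :: ys) = PySem.Set.update (s.add y) ys := by
      simp [PySem.Set.union, PySem.Set.update]
    rcases List.mem_cons.mp hx with hxy | hxy
    · subst hxy
      have : s.add x = s ++ [x] := by
        simp [PySem.Set.add, hxs]
      rw [hupd]
      calc s.length < (s.add x).length := by simp [this]
      _ ≤ _ := pvSet_update_len _ _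
    · by_cases hxa : x ∈ s.add y
      · have hxy' : x = y := by
          rcases (PySem.Set.mem_add s y x).mp hxa with h | h
          · exact absurd h hxs
          · exact h
        subst hxy'
        have : s.add x = s ++ [x] := by
          simp [PySem.Set.add, hxs]
        rw [hupd]
        calc s.length < (s.add x).length := by simp [this]
        _ ≤ _ := pvSet_update_len _ _
      · have := ih (s.add y) ⟨x, hxy, hxa⟩
        rw [hupd]
        have h1 : s.length ≤ (s.add y).length := by
          by_cases h : y ∈ s <;> simp [PySem.Set.add, h]
        rw [PySem.Set.union] at this
        omega

lemma pvInner_mono (m : PySem.Dict String (List String)) :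
    ∀ lst acc ch x, x ∈ acc → x ∈ (pvInner m lst acc ch).1 := by
  intro lst
  induction lst with
  | nil => intro acc ch x hx; simpa [pvInner] using hx
  | cons c rest ih =>
    intro acc ch x hx
    by_cases h : (m.contains c && !(PySem.Set.issubset (m.getD c []) acc)) = true
    · simp only [pvInner, h, if_true]
      exact ih _ _ x ((PySem.Set.mem_union _ _ x).mpr (Or.inl hx))
    · simp only [pvInner, h, if_false]
      exact ih _ _ x hx

lemma pvInner_mem (m : PySem.Dict String (List String)) :
    ∀ lst acc ch x, x ∈ (pvInner m lst acc ch).1 →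
      x ∈ acc ∨ ∃ c, c ∈ lst ∧ m.contains c = true ∧ x ∈ m.getD c [] := by
  intro lst
  induction lst with
  | nil => intro acc ch x hx; simp [pvInner] at hx; exact Or.inl hx
  | cons c rest ih =>
    intro acc ch x hx
    by_cases h : (m.contains c && !(PySem.Set.issubset (m.getD c []) acc)) = true
    · simp only [pvInner, h, if_true] at hx
      rcases ih _ _ x hx with h2 | ⟨c', hc1, hc2, hc3⟩
      · rcases (PySem.Set.mem_union _ _ x).mp h2 with h3 | h3
        · exact Or.inl h3
        · exact Or.inr ⟨c, List.mem_cons_self .., (Bool.and_eq_true .. ▸ h).1, h3⟩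
      · exact Or.inr ⟨c', List.mem_cons_of_mem _ hc1, hc2, hc3⟩
    · simp only [pvInner, h, if_false] at hx
      rcases ih _ _ x hx with h2 | ⟨c', hc1, hc2, hc3⟩
      · exact Or.inl h2
      · exact Or.inr ⟨c', List.mem_cons_of_mem _ hc1, hc2, hc3⟩

lemma pvInner_nodup (m : PySem.Dict String (List String)) :
    ∀ lst acc ch, List.Nodup acc → List.Nodup (pvInner m lst acc ch).1 := by
  intro lst
  induction lst with
  | nil => intro acc ch h; simpa [pvInner] using h
  | cons c rest ih =>
    intro acc ch h
    by_cases hb : (m.contains c && !(PySem.Set.issubset (m.getD c []) acc)) = true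
    · simp only [pvInner, hb, if_true]
      exact ih _ _ (PySem.Set.nodup_union _ _ h)
    · simp only [pvInner, hb, if_false]
      exact ih _ _ h

lemma pvInner_len (m : PySem.Dict String (List String)) :
    ∀ lst acc ch, acc.length ≤ (pvInner m lst acc ch).1.length := by
  intro lst
  induction lst with
  | nil => intro acc ch; simp [pvInner]
  | cons c rest ih =>
    intro acc ch
    by_cases hb : (m.contains c && !(PySem.Set.issubset (m.getD c []) acc)) = true
    · simp only [pvInner, hb, if_true]
      calc acc.length ≤ (PySem.Set.union acc (m.getD c [])).length := pvSet_union_len _ _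
      _ ≤ _ := ih _ _
    · simp only [pvInner, hb, if_false]
      exact ih _ _

lemma pvInner_true (m : PySem.Dict String (List String)) :
    ∀ lst acc, (pvInner m lst acc true).2 = true := by
  intro lst
  induction lst with
  | nil => intro acc; simp [pvInner]
  | cons c rest ih =>
    intro acc
    by_cases hb : (m.contains c && !(PySem.Set.issubset (m.getD c []) acc)) = true
    · simp only [pvInner, hb, if_true]; exact ih _
    · simp only [pvInner, hb, if_false]; exact ih _

lemma pvInner_false (m : PySem.Dict String (List String)) :
    ∀ lst acc ch, (pvInner m lst acc ch).2 = false →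
      ch = false ∧ (pvInner m lst acc ch).1 = acc ∧
      ∀ c ∈ lst, m.contains c = true → ∀ x ∈ m.getD c [], x ∈ acc := by
  intro lst
  induction lst with
  | nil => intro acc ch h; simp [pvInner] at h ⊢; exact h
  | cons c rest ih =>
    intro acc ch h
    by_cases hb : (m.contains c && !(PySem.Set.issubset (m.getD c []) acc)) = true
    · exfalso
      simp only [pvInner, hb, if_true] at h
      rw [pvInner_true] at h
      simp at h
    · simp only [pvInner, hb, if_false] at h ⊢
      obtain ⟨h1, h2, h3⟩ := ih _ _ h
      refine ⟨h1, h2, ?_⟩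
      intro c' hc' hcc x hx
      rcases List.mem_cons.mp hc' with he | he
      · subst he
        have : PySem.Set.issubset (m.getD c' []) acc = true := by
          rcases Bool.and_eq_false_iff.mp (Bool.eq_false_iff.mpr hb ▸ rfl : (m.contains c' && !(PySem.Set.issubset (m.getD c' []) acc)) = false) with h4 | h4
          · rw [hcc] at h4; exact absurd h4 (by simp)
          · simpa using h4
        exact (pvSet_issubset_iff _ _).mp this x hx
      · exact h3 c' he hcc x hx

lemma pvInner_growth (m : PySem.Dict String (List String)) :
    ∀ lst acc, (pvInner m lst acc false).2 = true →
      acc.length < (pvInner m lst acc false).1.length := by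
  intro lst
  induction lst with
  | nil => intro acc h; simp [pvInner] at h
  | cons c rest ih =>
    intro acc h
    by_cases hb : (m.contains c && !(PySem.Set.issubset (m.getD c []) acc)) = true
    · simp only [pvInner, hb, if_true] at h ⊢
      have hsub : ∃ x ∈ m.getD c [], x ∉ acc := by
        have h4 : PySem.Set.issubset (m.getD c []) acc = false := by
          rcases Bool.and_eq_true .. ▸ hb with ⟨_, h5⟩
          simpa using h5
        by_contra hcon
        push_neg at hcon
        rw [Bool.eq_false_iff] at h4
        exact h4 ((pvSet_issubset_iff _ _).mpr hcon)
      calc acc.length < (PySem.Set.union acc (m.getD c [])).length := pvSet_union_lt _ _ hsub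
      _ ≤ _ := pvInner_len m rest _ true
    · simp only [pvInner, hb, if_false] at h ⊢
      exact ih _ h

-- invariant of B's evolving dict
def pvInv (d m : PySem.Dict String (List String)) : Prop :=
  m.keys = d.keys ∧
  (∀ v, (m.getD v []).Nodup) ∧
  (∀ v x, x ∈ m.getD v [] → pvReach d v x) ∧
  (∀ v, d.contains v = true → ∀ x ∈ d.getD v [], x ∈ m.getD v [])

lemma pvSweep_true (d : PySem.Dict String (List String)) :
    ∀ ks m, (pvSweep d ks m true).2 = true := by
  intro ks
  induction ks with
  | nil => intro m; simp [pvSweep]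
  | cons v rest ih =>
    intro m
    simp only [pvSweep, pvInner_true]
    exact ih _

lemma pvSweep_len_mono (d : PySem.Dict String (List String)) :
    ∀ ks m ch w, (m.getD w []).length ≤ ((pvSweep d ks m ch).1.getD w []).length := by
  intro ks
  induction ks with
  | nil => intro m ch w; simp [pvSweep]
  | cons v rest ih =>
    intro m ch w
    simp only [pvSweep]
    calc (m.getD w []).length ≤ (((m.insert v (pvInner m (d.getD v []) (m.getD v []) ch).1)).getD w []).length := by
          rw [PySem.Dict.getD_insert]
          split
          · next he => subst he; exact pvInner_len m _ _ _
          · exact le_refl _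
    _ ≤ _ := ih _ _ _

lemma pvSweep_inv (d : PySem.Dict String (List String)) :
    ∀ ks m ch, (∀ v ∈ ks, d.contains v = true) → pvInv d m →
      pvInv d (pvSweep d ks m ch).1 := by
  intro ks
  induction ks with
  | nil => intro m ch _ h; simpa [pvSweep] using h
  | cons v rest ih =>
    intro m ch hks hInv
    obtain ⟨hkeys, hnd, hsound, hbase⟩ := hInv
    have hdv : d.contains v = true := hks v (List.mem_cons_self ..)
    have hmv : m.contains v = true := by
      rw [PySem.Dict.contains_iff_mem_keys, hkeys, ← PySem.Dict.contains_iff_mem_keys]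
      exact hdv
    simp only [pvSweep]
    apply ih _ _ (fun u hu => hks u (List.mem_cons_of_mem _ hu))
    refine ⟨?_, ?_, ?_, ?_⟩
    · rw [PySem.Dict.keys_insert_of_contains _ _ hmv]; exact hkeys
    · intro w
      rw [PySem.Dict.getD_insert]
      split
      · exact pvInner_nodup m _ _ _ (hnd v)
      · exact hnd w
    · intro w x hx
      rw [PySem.Dict.getD_insert] at hx
      split at hx
      · next he =>
        subst he
        rcases pvInner_mem m _ _ _ x hx with h2 | ⟨c, hc1, hc2, hc3⟩
        · exact hsound w x h2
        · have hdc : d.contains c = true := by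
            rw [PySem.Dict.contains_iff_mem_keys, ← hkeys, ← PySem.Dict.contains_iff_mem_keys]
            exact hc2
          exact pvReach.cons hdv hc1 (hsound c x hc3)
      · exact hsound w x hx
    · intro w hw x hx
      rw [PySem.Dict.getD_insert]
      split
      · next he => subst he; exact pvInner_mono m _ _ _ x (hbase w hw x hx)
      · exact hbase w hw x hx

lemma pvInsert_getD_self (m : PySem.Dict String (List String)) (v : String)
    (hnd : m.keys.Nodup) (hc : m.contains v = true) : m.insert v (m.getD v []) = m := by
  apply PySem.Dict.ext
  rw [PySem.Dict.items_insert_of_contains m _ hc]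
  have : ∀ p ∈ m.items, (if (p.1 == v) = true then (v, m.getD v []) else p) = p := by
    intro p hp
    split
    · next he =>
      have hev : p.1 = v := by exact eq_of_beq he
      have hpm : (p.1, p.2) ∈ m.items := by simpa using hp
      have := PySem.Dict.getD_of_mem_items m hpm hnd []
      rw [← hev, this]
    · rfl
  rw [List.map_congr_left this, List.map_id']

lemma pvSweep_false (d : PySem.Dict String (List String)) :
    ∀ ks m, (∀ v ∈ ks, m.contains v = true) → m.keys.Nodup →
      (pvSweep d ks m false).2 = false →
      (pvSweep d ks m false).1 = m ∧
      ∀ v ∈ ks, ∀ c ∈ d.getD v [], m.contains c = true → ∀ x ∈ m.getD c [], x ∈ m.getD v [] := by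
  intro ks
  induction ks with
  | nil => intro m _ _ _; simp [pvSweep]
  | cons v rest ih =>
    intro m hks hnd hfin
    simp only [pvSweep] at hfin ⊢
    have hp2 : (pvInner m (d.getD v []) (m.getD v []) false).2 = false := by
      by_contra hcon
      rw [Bool.not_eq_false] at hcon
      rw [hcon] at hfin
      rw [pvSweep_true] at hfin
      simp at hfin
    obtain ⟨_, hfst, hsubs⟩ := pvInner_false m _ _ _ hp2
    have hmv : m.contains v = true := hks v (List.mem_cons_self ..)
    have heq : m.insert v (pvInner m (d.getD v []) (m.getD v []) false).1 = m := by
      rw [hfst]; exact pvInsert_getD_self m v hnd hmv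
    rw [hp2, heq] at hfin ⊢
    obtain ⟨h1, h2⟩ := ih m (fun u hu => hks u (List.mem_cons_of_mem _ hu)) hnd hfin
    refine ⟨h1, ?_⟩
    intro u hu c hc hcc x hx
    rcases List.mem_cons.mp hu with he | he
    · subst he; exact hsubs c hc hcc x hx
    · exact h2 u he c hc hcc x hx

-- sum helpers
lemma pvSum_le_sum {l : List String} {f g : String → Nat} (h : ∀ j ∈ l, f j ≤ g j) :
    (l.map f).sum ≤ (l.map g).sum := by
  induction l with
  | nil => simp
  | cons a l ih =>
    simp only [List.map_cons, List.sum_cons]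
    have h1 := h a (List.mem_cons_self ..)
    have h2 := ih (fun j hj => h j (List.mem_cons_of_mem _ hj))
    omega

lemma pvSum_lt_sum {l : List String} {f g : String → Nat} (h : ∀ j ∈ l, f j ≤ g j)
    {i : String} (hi : i ∈ l) (hlt : f i < g i) : (l.map f).sum < (l.map g).sum := by
  induction l with
  | nil => simp at hi
  | cons a l ih =>
    simp only [List.map_cons, List.sum_cons]
    rcases List.mem_cons.mp hi with he | he
    · subst he
      have := pvSum_le_sum (fun j hj => h j (List.mem_cons_of_mem _ hj))
      omega
    · have h1 := h a (List.mem_cons_self ..)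
      have h2 := ih (fun j hj => h j (List.mem_cons_of_mem _ hj)) he
      omega

lemma pvSum_le_card {l : List String} {f : String → Nat} {n : Nat} (h : ∀ x ∈ l, f x ≤ n) :
    (l.map f).sum ≤ l.length * n := by
  induction l with
  | nil => simp
  | cons a l ih =>
    simp only [List.map_cons, List.sum_cons, List.length_cons]
    have h1 := h a (List.mem_cons_self ..)
    have h2 := ih (fun j hj => h j (List.mem_cons_of_mem _ hj))
    have : (l.length + 1) * n = l.length * n + n := by ring
    omega

def pvLen (d m : PySem.Dict String (List String)) : Nat :=
  (d.keys.map (fun v => (m.getD v []).length)).sum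

lemma pvSweep_growth (d : PySem.Dict String (List String)) :
    ∀ ks m, (∀ v ∈ ks, m.contains v = true) → m.keys = d.keys → m.keys.Nodup →
      (pvSweep d ks m false).2 = true → pvLen d m < pvLen d (pvSweep d ks m false).1 := by
  intro ks
  induction ks with
  | nil => intro m _ _ _ h; simp [pvSweep] at h
  | cons v rest ih =>
    intro m hks hkeys hnd hfin
    have hmv : m.contains v = true := hks v (List.mem_cons_self ..)
    have hvdk : v ∈ d.keys := by
      rw [← hkeys, ← PySem.Dict.contains_iff_mem_keys]; exact hmv
    simp only [pvSweep] at hfin ⊢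
    by_cases hp2 : (pvInner m (d.getD v []) (m.getD v []) false).2 = true
    · -- v's set strictly grew; the rest of the sweep is monotone
      have hgrow := pvInner_growth m _ _ hp2
      have hstep : pvLen d m < pvLen d (m.insert v (pvInner m (d.getD v []) (m.getD v []) false).1) := by
        apply pvSum_lt_sum (i := v) _ hvdk
        · rw [PySem.Dict.getD_insert]; simp only [if_pos rfl]; exact hgrow
        · intro j _
          rw [PySem.Dict.getD_insert]
          split
          · next he => subst he; exact le_of_lt hgrow
          · exact le_refl _
      have hmono : pvLen d (m.insert v (pvInner m (d.getD v []) (m.getD v []) false).1)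
          ≤ pvLen d (pvSweep d rest (m.insert v (pvInner m (d.getD v []) (m.getD v []) false).1) (pvInner m (d.getD v []) (m.getD v []) false).2).1 := by
        apply pvSum_le_sum
        intro j _
        exact pvSweep_len_mono d rest _ _ j
      omega
    · rw [Bool.not_eq_true] at hp2
      obtain ⟨_, hfst, _⟩ := pvInner_false m _ _ _ hp2
      have heq : m.insert v (pvInner m (d.getD v []) (m.getD v []) false).1 = m := by
        rw [hfst]; exact pvInsert_getD_self m v hnd hmv
      rw [hp2, heq] at hfin ⊢
      exact ih m (fun u hu => hks u (List.mem_cons_of_mem _ hu)) hkeys hnd hfin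

lemma pvLen_le (d m : PySem.Dict String (List String)) (hInv : pvInv d m) :
    pvLen d m ≤ d.keys.length * (pvUniv d).length := by
  obtain ⟨_, hnd, hsound, _⟩ := hInv
  apply pvSum_le_card
  intro v _
  apply List.Subperm.length_le
  apply List.Nodup.subperm (hnd v)
  intro x hx
  exact pvReach_univ (hsound v x hx)

lemma pvFix_spec (d : PySem.Dict String (List String)) (hnd : d.keys.Nodup) :
    ∀ fuel m, pvInv d m → d.keys.length * (pvUniv d).length + 1 ≤ pvLen d m + fuel →
      pvInv d (pvFix d d.keys fuel m) ∧
      (∀ v ∈ d.keys, ∀ c ∈ d.getD v [],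
        (pvFix d d.keys fuel m).contains c = true →
        ∀ x ∈ (pvFix d d.keys fuel m).getD c [], x ∈ (pvFix d d.keys fuel m).getD v []) := by
  intro fuel
  induction fuel with
  | zero =>
    intro m hInv hfuel
    exfalso
    have := pvLen_le d m hInv
    omega
  | succ fuel ih =>
    intro m hInv hfuel
    have hkeys := hInv.1
    have hks : ∀ v ∈ d.keys, d.contains v = true :=
      fun v hv => (PySem.Dict.contains_iff_mem_keys d v).mpr hv
    have hmks : ∀ v ∈ d.keys, m.contains v = true := by
      intro v hv
      rw [PySem.Dict.contains_iff_mem_keys, hkeys]; exact hv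
    have hmnd : m.keys.Nodup := by rw [hkeys]; exact hnd
    by_cases hp : (pvSweep d d.keys m false).2 = true
    · have hInv' := pvSweep_inv d d.keys m false hks hInv
      have hgrow := pvSweep_growth d d.keys m hmks hkeys hmnd hp
      have hbound := pvLen_le d m hInv
      simp only [pvFix, hp, if_true]
      exact ih _ hInv' (by omega)
    · rw [Bool.not_eq_true] at hp
      obtain ⟨heq, hclosed⟩ := pvSweep_false d d.keys m hmks hmnd hp
      simp only [pvFix, hp, Bool.false_eq_true, if_false]
      rw [heq]
      exact ⟨hInv, fun v hv c hc hcc x hx => hclosed v hv c hc hcc x hx⟩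

-- sorted lists of equal finite sets coincide
lemma pvSorted_congr (xs ys : List String) (hx : xs.Nodup) (hy : ys.Nodup)
    (h : ∀ a, a ∈ xs ↔ a ∈ ys) :
    PySem.List.sorted xs (fun x => x) = PySem.List.sorted ys (fun x => x) := by
  have hperm : ys.Perm xs := (List.perm_ext_iff_of_nodup hy hx).mpr (fun a => (h a).symm)
  have hs : (PySem.List.sorted ys (fun x => x)).Perm xs :=
    (PySem.List.sorted_perm ys (fun x => x) false).trans hperm
  have hnd : (PySem.List.sorted ys (fun x => x)).Nodup :=
    ((PySem.List.sorted_perm ys (fun x => x) false).nodup_iff).mpr hy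
  have hle := PySem.List.sorted_pairwise ys (fun x => x)
  have hlt : List.Pairwise (fun a b : String => a < b) (PySem.List.sorted ys (fun x => x)) := by
    have := hle.and hnd
    exact this.imp (fun h => lt_of_le_of_ne h.1 h.2)
  exact PySem.List.sorted_eq_of_perm_of_pairwise_lt xs _ (fun x => x) hs hlt

-- initial dict of B: m0 = {v: set(edges[v]) for v in edges}
lemma pvM0_keys (d : PySem.Dict String (List String)) (hnd : d.keys.Nodup) :
    (d.keys.foldl (fun m v => m.insert v (PySem.Set.ofList (d.getD v []))) PySem.Dict.empty).keys
      = d.keys := by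
  rw [PySem.Dict.keys_foldl_insert (f := fun _ v => PySem.Set.ofList (d.getD v []))]
  rw [PySem.Dict.keys_empty]
  show PySem.Set.ofList d.keys = d.keys
  exact PySem.Set.ofList_eq_self_of_nodup _ hnd

lemma pvM0_getD (d : PySem.Dict String (List String)) (hnd : d.keys.Nodup) (v : String)
    (hv : v ∈ d.keys) :
    (d.keys.foldl (fun m v => m.insert v (PySem.Set.ofList (d.getD v []))) PySem.Dict.empty).getD v []
      = PySem.Set.ofList (d.getD v []) := by
  have hitems := PySem.Dict.items_foldl_insert_fresh d.keys (fun v => v)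
    (fun v => PySem.Set.ofList (d.getD v [])) PySem.Dict.empty
    (fun a _ => PySem.Dict.contains_empty a) (by simpa using hnd)
  apply PySem.Dict.getD_of_mem_items
  · rw [hitems]
    simp only [PySem.Dict.empty, List.nil_append]
    exact List.mem_map.mpr ⟨v, hv, rfl⟩
  · rw [pvM0_keys d hnd]; exact hnd

lemma pvM0_getD_not (d : PySem.Dict String (List String)) (hnd : d.keys.Nodup) (v : String)
    (hv : v ∉ d.keys) :
    (d.keys.foldl (fun m v => m.insert v (PySem.Set.ofList (d.getD v []))) PySem.Dict.empty).getD v []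
      = [] := by
  apply PySem.Dict.getD_of_not_contains
  rw [← Bool.not_eq_true, PySem.Dict.contains_iff_mem_keys, pvM0_keys d hnd]
  exact hv

lemma pvM0_inv (d : PySem.Dict String (List String)) (hnd : d.keys.Nodup) :
    pvInv d (d.keys.foldl (fun m v => m.insert v (PySem.Set.ofList (d.getD v []))) PySem.Dict.empty) := by
  refine ⟨pvM0_keys d hnd, ?_, ?_, ?_⟩
  · intro v
    by_cases hv : v ∈ d.keys
    · rw [pvM0_getD d hnd v hv]; exact PySem.Set.nodup_ofList _
    · rw [pvM0_getD_not d hnd v hv]; exact List.nodup_nil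
  · intro v x hx
    by_cases hv : v ∈ d.keys
    · rw [pvM0_getD d hnd v hv, PySem.Set.mem_ofList] at hx
      exact pvReach.base ((PySem.Dict.contains_iff_mem_keys d v).mpr hv) hx
    · rw [pvM0_getD_not d hnd v hv] at hx; simp at hx
  · intro v hv x hx
    have hvk : v ∈ d.keys := (PySem.Dict.contains_iff_mem_keys d v).mp hv
    rw [pvM0_getD d hnd v hvk, PySem.Set.mem_ofList]
    exact hx

-- ===== VERDICT (by name: the statement is the Claim_ definition above) =====
theorem build_descendants_map_spec : Claim_equal_build_descendants_map := by
  unfold Claim_equal_build_descendants_map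
  intro edges _hdom
  unfold Spec_build_descendants_map
  show build_descendants_map edges = build_descendants_map_alt edges
  rw [build_descendants_map, build_descendants_map_alt]
  set d := PySem.Dict.ofList edges with hd
  have hnd : d.keys.Nodup := PySem.Dict.nodup_keys_ofList edges
  set m0 := d.keys.foldl (fun m v => m.insert v (PySem.Set.ofList (d.getD v []))) PySem.Dict.empty with hm0
  set M := pvFix d d.keys (d.keys.length * (pvUniv d).length + 1) m0 with hM
  have hfix := pvFix_spec d hnd (d.keys.length * (pvUniv d).length + 1) m0
    (pvM0_inv d hnd) (by omega)
  obtain ⟨⟨hMkeys, hMnd, hMsound, hMbase⟩, hMclosed⟩ := hfix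
  -- reachable ⟹ in M's set
  have hMreach : ∀ v x, pvReach d v x → x ∈ M.getD v [] := by
    intro v x h
    induction h with
    | @base v' x' hv hx => exact hMbase _ hv _ hx
    | @cons v' c' x' hv hm hr ih =>
      have hvk : v' ∈ d.keys := (PySem.Dict.contains_iff_mem_keys d v').mp hv
      have hck : M.contains c' = true := by
        rw [PySem.Dict.contains_iff_mem_keys, hMkeys, ← PySem.Dict.contains_iff_mem_keys]
        exact pvReach_key hr
      exact hMclosed v' hvk c' hm hck x' ih
  -- the two items lists
  rw [PySem.Dict.items_foldl_insert_fresh d.keys (fun v => v)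
    (fun driver => PySem.List.sorted (pvBFS d [driver] PySem.Set.empty) (fun x => x))
    PySem.Dict.empty (fun a _ => PySem.Dict.contains_empty a) (by simpa using hnd)]
  rw [PySem.Dict.items_foldl_insert_fresh d.keys (fun v => v)
    (fun v => PySem.List.sorted (M.getD v []) (fun x => x))
    PySem.Dict.empty (fun a _ => PySem.Dict.contains_empty a) (by simpa using hnd)]
  congr 1
  apply List.map_congr_left
  intro v hv
  have hbfs_nodup : (pvBFS d [v] PySem.Set.empty).Nodup :=
    pvBFS_nodup d [v] PySem.Set.empty List.nodup_nil
  have hmem : ∀ a, a ∈ pvBFS d [v] PySem.Set.empty ↔ a ∈ M.getD v [] := by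
    intro a
    rw [pvBFS_reach d v a]
    constructor
    · exact hMreach v a
    · exact fun ha => hMsound v a ha
  rw [pvSorted_congr (pvBFS d [v] PySem.Set.empty) (M.getD v []) hbfs_nodup (hMnd v) hmem]
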